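-- pv_equiv track=rewrite | github.com/ZeVicTech/AlgorithmProblems | 비트마스킹/양궁대회.py | solution
-- ===== SOURCE A (Python) =====
-- def solution(n, info):
--     answer = [0] * 11
--     tmp = [0] * 11
--     maxDiff = 0
--
--     for subset in range(1<<10):
--         cnt = 0
--         ryan = 0
--         appeach = 0
--         for i in range(11):
--             if subset & (1<<i):
--                 ryan += 10-i
--                 tmp[i] = info[i] + 1
--                 cnt += tmp[i]
--             else:
--                 tmp[i] = 0
--                 if info[i]:
--                     appeach += 10-i
--
--         if cnt > n:
--             continue
--
--         tmp[10] = n - cnt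
--
--         if ryan-appeach == maxDiff:
--             for i in reversed(range(11)):
--                 if tmp[i] > answer[i]:
--                     answer = tmp[:]
--                     break
--                 if tmp[i] < answer[i]:
--                     break
--
--         elif ryan-appeach > maxDiff:
--             maxDiff = ryan-appeach
--             answer = tmp[:]
--
--     if maxDiff == 0:
--         answer = [-1]
--
--     return answer
-- ===== SOURCE B (Python) =====
-- def solution(n, info):
--     # Recursive take/skip enumeration over Ryan's 10 targets; winner chosen by an
--     # explicit lexicographic key (diff, reversed hit vector) instead of A's
--     # incremental maxDiff/tie-break loop.
--     def leaves(i):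
--         if i >= 10:
--             return [[]]
--         out = []
--         for rest in leaves(i + 1):
--             out.append([False] + rest)
--             out.append([True] + rest)
--         return out
--
--     best = None  # (key, tmp)
--     for pick in leaves(0):
--         tmp = [info[i] + 1 if pick[i] else 0 for i in range(10)]
--         cnt = sum(tmp)
--         if cnt > n:
--             continue
--         ryan = sum(10 - i for i in range(10) if pick[i])
--         apeach = sum(10 - i for i in range(10) if info[i] and not pick[i])
--         tmp.append(n - cnt)
--         key = (ryan - apeach, tmp[::-1])
--         if best is None or key > best[0]:
--             best = (key, tmp)
--     if best is None or best[0][0] <= 0: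
--         return [-1]
--     return best[1]
-- ===== Notes on version B (the rewrite author's own statement) =====
-- stated objective: alternative
-- what changed: Replaces A's bitmask loop with incremental maxDiff tracking and an in-loop reversed-index tie-break scan by a recursive take/skip enumeration of the 10 targets and selection of the winner via an explicit lexicographic key (diff, reversed hit vector).
import Mathlib
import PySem

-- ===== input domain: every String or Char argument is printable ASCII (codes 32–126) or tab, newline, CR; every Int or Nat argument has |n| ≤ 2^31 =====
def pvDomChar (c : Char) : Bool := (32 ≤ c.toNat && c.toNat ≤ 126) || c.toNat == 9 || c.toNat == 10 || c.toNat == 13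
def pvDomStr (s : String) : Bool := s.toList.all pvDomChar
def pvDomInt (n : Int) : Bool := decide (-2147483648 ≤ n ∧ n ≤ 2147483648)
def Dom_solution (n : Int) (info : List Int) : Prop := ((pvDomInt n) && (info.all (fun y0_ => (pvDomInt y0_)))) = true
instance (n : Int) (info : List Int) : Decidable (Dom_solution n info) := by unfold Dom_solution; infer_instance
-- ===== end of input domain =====

-- B replaces A's bitmask loop + incremental maxDiff/tie-break tracking by a recursive
-- take/skip enumeration of the 10 targets and an explicit lexicographic-key maximum.

-- ===== PORT A =====
-- 'for i in reversed(range(11)): if tmp[i] > answer[i]: replace, break; if tmp[i] < answer[i]: break'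
-- returned Bool = whether answer gets replaced by tmp
def tieRepl (idxs : List Int) (tmp ans : List Int) : Bool :=
  match idxs with
  | [] => false
  | i :: is =>
    if (PySem.List.pyGet? tmp i).getD 0 > (PySem.List.pyGet? ans i).getD 0 then true
    else if (PySem.List.pyGet? tmp i).getD 0 < (PySem.List.pyGet? ans i).getD 0 then false
    else tieRepl is tmp ans

-- Python's tmp list persists across outer iterations, but every iteration overwrites all
-- 11 slots before reading them, so it is rebuilt locally (append = the sequential writes
-- tmp[0..10]); info[i] is pyGet? (IndexError excluded by Pre_); 1<<i is ported as
-- (1 <<< i.toNat) (i ∈ [0,10] here, so toNat is exact).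
def solution (n : Int) (info : List Int) : List Int :=
  let res :=
    (PySem.List.pyRange 0 (1 <<< 10) 1).foldl
      (fun (st : List Int × Int) s =>
        let inner :=
          (PySem.List.pyRange 0 11 1).foldl
            (fun (t : Int × Int × Int × List Int) i =>
              if PySem.Int.band s ((1 : Int) <<< i.toNat) ≠ 0 then
                let v := (PySem.List.pyGet? info i).getD 0 + 1
                (t.1 + v, t.2.1 + (10 - i), t.2.2.1, t.2.2.2 ++ [v])
              else
                if (PySem.List.pyGet? info i).getD 0 ≠ 0 then
                  (t.1, t.2.1, t.2.2.1 + (10 - i), t.2.2.2 ++ [0])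
                else (t.1, t.2.1, t.2.2.1, t.2.2.2 ++ [0]))
            (0, 0, 0, [])
        let cnt := inner.1
        let ryan := inner.2.1
        let ape := inner.2.2.1
        if cnt > n then st
        else
          let tmp := inner.2.2.2.set 10 (n - cnt)
          if ryan - ape = st.2 then
            (if tieRepl ((PySem.List.pyRange 0 11 1).reverse) tmp st.1 then tmp else st.1, st.2)
          else if ryan - ape > st.2 then (tmp, ryan - ape)
          else st)
      (List.replicate 11 0, 0)
  if res.2 = 0 then [-1] else res.1

-- ===== PORT B =====
-- leaves(i): all take/skip vectors for targets i..9, first position varying fastest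
def leavesB (i : Nat) : List (List Bool) :=
  if 10 ≤ i then [[]]
  else (leavesB (i + 1)).foldl (fun out r => out ++ [false :: r, true :: r]) []
termination_by 10 - i

-- Python's '>' on two lists of ints (lexicographic)
def listGt (a b : List Int) : Bool :=
  match a, b with
  | [], [] => false
  | [], _ :: _ => false
  | _ :: _, [] => true
  | x :: xs, y :: ys => if x > y then true else if x < y then false else listGt xs ys

-- Python's '>' on the key tuples (Int, list of ints)
def keyGt (a b : Int × List Int) : Bool :=
  if a.1 > b.1 then true else if a.1 < b.1 then false else listGt a.2 b.2

def solution_alt (n : Int) (info : List Int) : List Int :=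
  let best :=
    (leavesB 0).foldl
      (fun (best : Option ((Int × List Int) × List Int)) pick =>
        let tmp := (List.range 10).map (fun (i : Nat) =>
          if (PySem.List.pyGet? pick (i : Int)).getD false then (PySem.List.pyGet? info (i : Int)).getD 0 + 1 else 0)
        let cnt := tmp.sum
        if cnt > n then best
        else
          let ryan := (((List.range 10).filter
            (fun (i : Nat) => (PySem.List.pyGet? pick (i : Int)).getD false)).map (fun (i : Nat) => 10 - (i : Int))).sum
          let ape := (((List.range 10).filter
            (fun (i : Nat) => decide ((PySem.List.pyGet? info (i : Int)).getD 0 ≠ 0)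
              && !((PySem.List.pyGet? pick (i : Int)).getD false))).map (fun (i : Nat) => 10 - (i : Int))).sum
          let tmp2 := tmp ++ [n - cnt]
          let key := (ryan - ape, tmp2.reverse)
          match best with
          | none => some (key, tmp2)
          | some b => if keyGt key b.1 then some (key, tmp2) else best)
      none
  match best with
  | none => [-1]
  | some (k, t) => if k.1 ≤ 0 then [-1] else t

-- ===== PRECONDITION & SPEC =====
-- Pre_ excludes exactly the inputs where A raises IndexError (info shorter than 11)
def Pre_solution (n : Int) (info : List Int) : Prop := 11 ≤ info.length
instance (n : Int) (info : List Int) : Decidable (Pre_solution n info) := by unfold Pre_solution; infer_instance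
def pvWitness_solution : Int × List Int := (5, [2, 1, 1, 1, 0, 0, 0, 0, 0, 0, 0])

def Spec_solution (n : Int) (info : List Int) (out : List Int) : Prop := out = solution_alt n info
instance (n : Int) (info : List Int) (out : List Int) : Decidable (Spec_solution n info out) := by unfold Spec_solution; infer_instance

-- ===== CLAIM (what is proved, stated in full; the proofs are below) =====
def Claim_equal_solution : Prop := ∀ (n : Int) (info : List Int), Dom_solution n info → Pre_solution n info → Spec_solution n info (solution n info)

-- ===== LEMMAS AND PROOFS =====

def pvTmp (info : List Int) (m : Nat) (k : Nat) : List Int :=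
  (List.range k).map (fun j => if m.testBit j then (PySem.List.pyGet? info (j : Int)).getD 0 + 1 else 0)

def pvRyan (m : Nat) (k : Nat) : Int :=
  ((List.range k).map (fun (j : Nat) => if m.testBit j then (10 : Int) - (j : Int) else 0)).sum

def pvApe (info : List Int) (m : Nat) (k : Nat) : Int :=
  ((List.range k).map (fun (j : Nat) =>
    if decide ((PySem.List.pyGet? info (j : Int)).getD 0 ≠ 0) && !(m.testBit j) then (10 : Int) - (j : Int) else 0)).sum

def pvVals (n : Int) (info : List Int) (m : Nat) : Int × Int × List Int :=
  ((pvTmp info m 10).sum, pvRyan m 10 - pvApe info m 10,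
    pvTmp info m 10 ++ [n - (pvTmp info m 10).sum])

def stepA (n : Int) (st : List Int × Int) (v : Int × Int × List Int) : List Int × Int :=
  if v.1 > n then st
  else
    if v.2.1 = st.2 then
      (if tieRepl ((PySem.List.pyRange 0 11 1).reverse) v.2.2 st.1 then v.2.2 else st.1, st.2)
    else if v.2.1 > st.2 then (v.2.2, v.2.1)
    else st

lemma band_cond (m c : Nat) :
    (PySem.Int.band (↑m) ((1 : Int) <<< ((c : Nat) : Int)) ≠ 0) = (m.testBit c = true) := by
  rw [Int.shiftLeft_natCast_right]
  have h : ((1 : Int) <<< c) = ((1 <<< c : Nat) : Int) := by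
    simp [Int.shiftLeft_eq, Nat.shiftLeft_eq]
  rw [h, PySem.Int.band_natCast, Nat.one_shiftLeft, eq_iff_iff]
  rw [Nat.and_two_pow]
  rcases Bool.eq_false_or_eq_true (m.testBit c) with hb | hb <;> simp [hb]

lemma innerA_char (info : List Int) (m : Nat) :
    ∀ (k : Nat), k ≤ 11 →
    (PySem.List.pyRange 0 (k : Int) 1).foldl
      (fun (t : Int × Int × Int × List Int) i =>
        if PySem.Int.band (↑m) ((1 : Int) <<< i.toNat) ≠ 0 then
          let v := (PySem.List.pyGet? info i).getD 0 + 1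
          (t.1 + v, t.2.1 + (10 - i), t.2.2.1, t.2.2.2 ++ [v])
        else
          if (PySem.List.pyGet? info i).getD 0 ≠ 0 then
            (t.1, t.2.1, t.2.2.1 + (10 - i), t.2.2.2 ++ [0])
          else (t.1, t.2.1, t.2.2.1, t.2.2.2 ++ [0]))
      (0, 0, 0, []) =
    ((pvTmp info m k).sum, pvRyan m k, pvApe info m k, pvTmp info m k) := by
  intro k
  induction k with
  | zero => intro _; rfl
  | succ k ih =>
    intro hk
    have hc : ((k+1 : Nat) : Int) = (k : Int) + 1 := by push_cast; ring
    rw [hc, PySem.List.pyRange_one_succ_right (by positivity), List.foldl_append, ih (by omega)]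
    simp only [List.foldl_cons, List.foldl_nil]
    have htn : ((k : Int)).toNat = k := Int.toNat_natCast k
    rw [htn]
    simp only [band_cond]
    unfold pvTmp pvRyan pvApe
    rw [List.range_succ, List.map_append, List.map_append, List.map_append,
      List.sum_append, List.sum_append, List.sum_append]
    by_cases hb : m.testBit k <;> by_cases hg : info[k]?.getD 0 = 0 <;>
      simp [hb, hg]

lemma set_last_10 (l : List Int) (x y : Int) (hl : l.length = 10) :
    (l ++ [x]).set 10 y = l ++ [y] := by
  rw [List.set_append_right _ _ (by omega)]
  simp [hl]

lemma bodyA_eq (n : Int) (info : List Int) (st : List Int × Int) (m : Nat) (hm : m < 1024) :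
    (fun (st : List Int × Int) (s : Int) =>
        let inner :=
          (PySem.List.pyRange 0 11 1).foldl
            (fun (t : Int × Int × Int × List Int) i =>
              if PySem.Int.band s ((1 : Int) <<< i.toNat) ≠ 0 then
                let v := (PySem.List.pyGet? info i).getD 0 + 1
                (t.1 + v, t.2.1 + (10 - i), t.2.2.1, t.2.2.2 ++ [v])
              else
                if (PySem.List.pyGet? info i).getD 0 ≠ 0 then
                  (t.1, t.2.1, t.2.2.1 + (10 - i), t.2.2.2 ++ [0])
                else (t.1, t.2.1, t.2.2.1, t.2.2.2 ++ [0]))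
            (0, 0, 0, [])
        let cnt := inner.1
        let ryan := inner.2.1
        let ape := inner.2.2.1
        if cnt > n then st
        else
          let tmp := inner.2.2.2.set 10 (n - cnt)
          if ryan - ape = st.2 then
            (if tieRepl ((PySem.List.pyRange 0 11 1).reverse) tmp st.1 then tmp else st.1, st.2)
          else if ryan - ape > st.2 then (tmp, ryan - ape)
          else st) st (↑m)
      = stepA n st (pvVals n info m) := by
  have hbit : m.testBit 10 = false := Nat.testBit_lt_two_pow (by omega)
  have htmp : pvTmp info m 11 = pvTmp info m 10 ++ [0] := by
    unfold pvTmp; rw [List.range_succ, List.map_append]; simp [hbit]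
  have hry : pvRyan m 11 = pvRyan m 10 := by
    unfold pvRyan; rw [List.range_succ, List.map_append, List.sum_append]; simp [hbit]
  have hape : pvApe info m 11 = pvApe info m 10 := by
    unfold pvApe; rw [List.range_succ, List.map_append, List.sum_append]; simp
  have hlen : (pvTmp info m 10).length = 10 := by
    unfold pvTmp; simp
  simp only []
  rw [show ((11:Int)) = (((11:Nat)) : Int) by norm_num]
  rw [innerA_char info m 11 (le_refl _)]
  simp only [htmp, hry, hape]
  rw [List.sum_append]
  simp only [List.sum_cons, List.sum_nil, add_zero]
  rw [set_last_10 _ _ _ hlen]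
  unfold stepA pvVals
  simp only []
  norm_cast

def stepB (n : Int) (best : Option ((Int × List Int) × List Int)) (v : Int × Int × List Int) :
    Option ((Int × List Int) × List Int) :=
  if v.1 > n then best
  else
    match best with
    | none => some ((v.2.1, v.2.2.reverse), v.2.2)
    | some b => if keyGt (v.2.1, v.2.2.reverse) b.1 then some ((v.2.1, v.2.2.reverse), v.2.2) else best

lemma sum_filter_map {α : Type} (l : List α) (p : α → Bool) (f : α → Int) :
    ((l.filter p).map f).sum = (l.map (fun x => if p x then f x else 0)).sum := by
  induction l with
  | nil => rfl
  | cons x l ih => by_cases h : p x <;> simp [h, ih]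

lemma bodyB_eq (n : Int) (info : List Int)
    (best : Option ((Int × List Int) × List Int)) (m : Nat) :
    (fun (best : Option ((Int × List Int) × List Int)) pick =>
        let tmp := (List.range 10).map (fun (i : Nat) =>
          if (PySem.List.pyGet? pick (i : Int)).getD false then (PySem.List.pyGet? info (i : Int)).getD 0 + 1 else 0)
        let cnt := tmp.sum
        if cnt > n then best
        else
          let ryan := (((List.range 10).filter
            (fun (i : Nat) => (PySem.List.pyGet? pick (i : Int)).getD false)).map (fun (i : Nat) => 10 - (i : Int))).sum
          let ape := (((List.range 10).filter
            (fun (i : Nat) => decide ((PySem.List.pyGet? info (i : Int)).getD 0 ≠ 0)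
              && !((PySem.List.pyGet? pick (i : Int)).getD false))).map (fun (i : Nat) => 10 - (i : Int))).sum
          let tmp2 := tmp ++ [n - cnt]
          let key := (ryan - ape, tmp2.reverse)
          match best with
          | none => some (key, tmp2)
          | some b => if keyGt key b.1 then some (key, tmp2) else best)
      best ((List.range 10).map (fun j => m.testBit j))
      = stepB n best (pvVals n info m) := by
  have hpk : ∀ i ∈ List.range 10,
      (PySem.List.pyGet? ((List.range 10).map (fun j => m.testBit j)) (i : Int)).getD false
        = m.testBit i := by
    intro i hi
    rw [PySem.List.pyGet?_natCast]
    have : i < 10 := List.mem_range.mp hi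
    simp [List.getElem?_map, List.getElem?_range this]
  simp only []
  have htmp : (List.range 10).map (fun (i : Nat) =>
      if (PySem.List.pyGet? ((List.range 10).map (fun j => m.testBit j)) (i : Int)).getD false
      then (PySem.List.pyGet? info (i : Int)).getD 0 + 1 else 0) = pvTmp info m 10 := by
    unfold pvTmp
    apply List.map_congr_left
    intro i hi
    rw [hpk i hi]
  have hry : (((List.range 10).filter
      (fun (i : Nat) => (PySem.List.pyGet? ((List.range 10).map (fun j => m.testBit j)) (i : Int)).getD false)).map
        (fun (i : Nat) => 10 - (i : Int))).sum = pvRyan m 10 := by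
    rw [sum_filter_map]
    unfold pvRyan
    apply congrArg
    apply List.map_congr_left
    intro i hi
    rw [hpk i hi]
  have hape : (((List.range 10).filter
      (fun (i : Nat) => decide ((PySem.List.pyGet? info (i : Int)).getD 0 ≠ 0)
        && !((PySem.List.pyGet? ((List.range 10).map (fun j => m.testBit j)) (i : Int)).getD false))).map
        (fun (i : Nat) => 10 - (i : Int))).sum = pvApe info m 10 := by
    rw [sum_filter_map]
    unfold pvApe
    apply congrArg
    apply List.map_congr_left
    intro i hi
    rw [hpk i hi]
  rw [htmp, hry, hape]
  unfold stepB pvVals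
  rfl

def pvInv (ans : List Int) (md : Int) (best : Option ((Int × List Int) × List Int)) : Prop :=
  (md = 0 ∧ (best = none ∨ ∃ k t, best = some (k, t) ∧ k.1 ≤ 0))
  ∨ (0 < md ∧ ∃ t, best = some ((md, t.reverse), t) ∧ ans = t ∧ t.length = 11)

lemma tieRepl_eq : ∀ (j : Nat) (a b : List Int), j ≤ a.length → j ≤ b.length →
    tieRepl (((List.range j).reverse).map Int.ofNat) a b
      = listGt (a.take j).reverse (b.take j).reverse := by
  intro j
  induction j with
  | zero => intro a b _ _; rfl
  | succ j ih =>
    intro a b ha hb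
    have hja : j < a.length := by omega
    have hjb : j < b.length := by omega
    rw [List.range_succ, List.reverse_append]
    simp only [List.reverse_cons, List.reverse_nil, List.nil_append, List.cons_append,
      List.map_cons]
    have hga : (PySem.List.pyGet? a ((j : Nat) : Int)).getD 0 = a[j] := by
      rw [PySem.List.pyGet?_natCast, List.getElem?_eq_getElem hja]; rfl
    have hgb : (PySem.List.pyGet? b ((j : Nat) : Int)).getD 0 = b[j] := by
      rw [PySem.List.pyGet?_natCast, List.getElem?_eq_getElem hjb]; rfl
    have hta : a.take (j+1) = a.take j ++ [a[j]] := by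
      rw [List.take_add_one, List.getElem?_eq_getElem hja]; rfl
    have htb : b.take (j+1) = b.take j ++ [b[j]] := by
      rw [List.take_add_one, List.getElem?_eq_getElem hjb]; rfl
    rw [hta, htb, List.reverse_append, List.reverse_append]
    simp only [List.reverse_cons, List.reverse_nil, List.nil_append, List.cons_append]
    rw [tieRepl]
    have hcast : (Int.ofNat j) = ((j : Nat) : Int) := rfl
    rw [hcast, hga, hgb, listGt]
    by_cases h1 : a[j] > b[j]
    · simp [h1]
    · by_cases h2 : a[j] < b[j]
      · simp [h1, h2]
      · have hg : tieRepl ((List.map Int.ofNat (List.range j)).reverse) a b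
            = listGt (List.take j a).reverse (List.take j b).reverse := by
          rw [← List.map_reverse]; exact ih a b (by omega) (by omega)
        simp [h1, h2, hg]

lemma tieRepl_full (a b : List Int) (ha : a.length = 11) (hb : b.length = 11) :
    tieRepl ((PySem.List.pyRange 0 11 1).reverse) a b = listGt a.reverse b.reverse := by
  have h := tieRepl_eq 11 a b (by omega) (by omega)
  rw [List.take_of_length_le (by omega), List.take_of_length_le (by omega)] at h
  have hr : (PySem.List.pyRange 0 11 1) = (List.range 11).map Int.ofNat := by
    rw [show ((11:Int)) = (((11:Nat)) : Int) by norm_num, PySem.List.pyRange_zero_natCast]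
    rfl
  rw [hr, ← List.map_reverse]
  exact h

lemma sim_step (n : Int) (st : List Int × Int) (best : Option ((Int × List Int) × List Int))
    (v : Int × Int × List Int) (hv : v.2.2.length = 11) (hInv : pvInv st.1 st.2 best) :
    pvInv (stepA n st v).1 (stepA n st v).2 (stepB n best v) := by
  unfold pvInv
  rcases v with ⟨c, d, tmp⟩
  simp only at hv
  by_cases hcn : c > n
  · simpa [stepA, stepB, hcn, pvInv] using hInv
  rcases hInv with ⟨hmd, hb⟩ | ⟨hmd, t, hbest, hans, hlen⟩
  · -- maxDiff = 0
    by_cases hd0 : d = st.2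
    · have hA : stepA n st (c, d, tmp)
          = (if tieRepl ((PySem.List.pyRange 0 11 1).reverse) tmp st.1 then tmp else st.1, st.2) := by
        simp [stepA, hcn, hd0]
      rcases hb with hb | ⟨k, t, hbk, hk1⟩
      · have hB : stepB n best (c, d, tmp) = some ((d, tmp.reverse), tmp) := by
          simp [stepB, hcn, hb]
        rw [hA, hB]; left; exact ⟨hmd, Or.inr ⟨_, _, rfl, by simp only; omega⟩⟩
      · by_cases hrep : keyGt (d, tmp.reverse) k
        · have hB : stepB n best (c, d, tmp) = some ((d, tmp.reverse), tmp) := by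
            simp [stepB, hcn, hbk, hrep]
          rw [hA, hB]; left; exact ⟨hmd, Or.inr ⟨_, _, rfl, by simp only; omega⟩⟩
        · have hB : stepB n best (c, d, tmp) = best := by
            simp [stepB, hcn, hbk, hrep]
          rw [hA, hB]; left; exact ⟨hmd, Or.inr ⟨k, t, hbk, hk1⟩⟩
    · by_cases hdg : d > st.2
      · have hA : stepA n st (c, d, tmp) = (tmp, d) := by simp [stepA, hcn, hd0, hdg]
        have hd_pos : 0 < d := by omega
        rcases hb with hb | ⟨k, t, hbk, hk1⟩
        · have hB : stepB n best (c, d, tmp) = some ((d, tmp.reverse), tmp) := by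
            simp [stepB, hcn, hb]
          rw [hA, hB]; right; exact ⟨hd_pos, tmp, rfl, rfl, hv⟩
        · have hgt : keyGt (d, tmp.reverse) k = true := by
            simp only [keyGt]; simp only [gt_iff_lt]
            rw [if_pos (by omega : k.1 < d)]
          have hB : stepB n best (c, d, tmp) = some ((d, tmp.reverse), tmp) := by
            simp [stepB, hcn, hbk, hgt]
          rw [hA, hB]; right; exact ⟨hd_pos, tmp, rfl, rfl, hv⟩
      · have hA : stepA n st (c, d, tmp) = st := by simp [stepA, hcn, hd0, hdg]
        have hd_neg : d ≤ 0 := by omega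
        rcases hb with hb | ⟨k, t, hbk, hk1⟩
        · have hB : stepB n best (c, d, tmp) = some ((d, tmp.reverse), tmp) := by
            simp [stepB, hcn, hb]
          rw [hA, hB]; left; exact ⟨hmd, Or.inr ⟨_, _, rfl, hd_neg⟩⟩
        · by_cases hrep : keyGt (d, tmp.reverse) k
          · have hB : stepB n best (c, d, tmp) = some ((d, tmp.reverse), tmp) := by
              simp [stepB, hcn, hbk, hrep]
            rw [hA, hB]; left; exact ⟨hmd, Or.inr ⟨_, _, rfl, hd_neg⟩⟩
          · have hB : stepB n best (c, d, tmp) = best := by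
              simp [stepB, hcn, hbk, hrep]
            rw [hA, hB]; left; exact ⟨hmd, Or.inr ⟨k, t, hbk, hk1⟩⟩
  · -- maxDiff > 0
    by_cases hd : d = st.2
    · have htie : tieRepl ((PySem.List.pyRange 0 11 1).reverse) tmp st.1
          = listGt tmp.reverse t.reverse := by
        rw [hans]; exact tieRepl_full tmp t hv hlen
      have hkg : keyGt (d, tmp.reverse) (st.2, t.reverse) = listGt tmp.reverse t.reverse := by
        simp [keyGt, hd]
      by_cases hrep : listGt tmp.reverse t.reverse
      · have hA : stepA n st (c, d, tmp) = (tmp, st.2) := by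
          simp [stepA, hcn, hd, htie, hrep]
        have hB : stepB n best (c, d, tmp) = some ((d, tmp.reverse), tmp) := by
          simp [stepB, hcn, hbest, hkg, hrep]
        rw [hA, hB]; right
        refine ⟨hmd, tmp, ?_, rfl, hv⟩
        rw [hd]
      · have hA : stepA n st (c, d, tmp) = (st.1, st.2) := by
          simp [stepA, hcn, hd, htie, hrep]
        have hB : stepB n best (c, d, tmp) = best := by
          simp [stepB, hcn, hbest, hkg, hrep]
        rw [hA, hB]; right; exact ⟨hmd, t, hbest, hans, hlen⟩
    · by_cases hdg : d > st.2
      · have hA : stepA n st (c, d, tmp) = (tmp, d) := by simp [stepA, hcn, hd, hdg]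
        have hkg : keyGt (d, tmp.reverse) (st.2, t.reverse) = true := by
          simp only [keyGt]; simp only [gt_iff_lt]
          rw [if_pos (by omega : st.2 < d)]
        have hB : stepB n best (c, d, tmp) = some ((d, tmp.reverse), tmp) := by
          simp [stepB, hcn, hbest, hkg]
        rw [hA, hB]; right; exact ⟨by omega, tmp, rfl, rfl, hv⟩
      · have hlt : d < st.2 := by omega
        have hA : stepA n st (c, d, tmp) = st := by simp [stepA, hcn, hd, hdg]
        have hkg : keyGt (d, tmp.reverse) (st.2, t.reverse) = false := by
          simp only [keyGt]; simp only [gt_iff_lt]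
          rw [if_neg (by omega : ¬ st.2 < d), if_pos hlt]
        have hB : stepB n best (c, d, tmp) = best := by
          simp [stepB, hcn, hbest, hkg]
        rw [hA, hB]; right; exact ⟨hmd, t, hbest, hans, hlen⟩

lemma sim_fold (n : Int) : ∀ (V : List (Int × Int × List Int)),
    (∀ v ∈ V, v.2.2.length = 11) →
    ∀ (st : List Int × Int) (best : Option ((Int × List Int) × List Int)),
    pvInv st.1 st.2 best →
    pvInv (V.foldl (stepA n) st).1 (V.foldl (stepA n) st).2 (V.foldl (stepB n) best) := by
  intro V
  induction V with
  | nil => intro _ st best h; exact h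
  | cons v V ih =>
    intro hV st best h
    simp only [List.foldl_cons]
    exact ih (fun w hw => hV w (List.mem_cons_of_mem _ hw)) _ _
      (sim_step n st best v (hV v (List.mem_cons_self)) h)

lemma pv_range_two_mul : ∀ (M : Nat),
    List.range (2 * M) = (List.range M).flatMap (fun v => [2 * v, 2 * v + 1]) := by
  intro M
  induction M with
  | zero => rfl
  | succ M ih =>
    have h2 : 2 * (M + 1) = (2 * M + 1) + 1 := by ring
    rw [h2, List.range_succ, List.range_succ, List.range_succ, List.flatMap_append, ← ih]
    simp

lemma leaves_char : ∀ (k : Nat), k ≤ 10 →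
    leavesB (10 - k) = (List.range (2 ^ k)).map (fun m => (List.range k).map (fun j => m.testBit j)) := by
  intro k
  induction k with
  | zero => intro _; rw [leavesB]; simp
  | succ k ih =>
    intro hk
    have h1 : ¬ 10 ≤ 10 - (k+1) := by omega
    rw [leavesB, if_neg h1]
    have h2 : 10 - (k+1) + 1 = 10 - k := by omega
    rw [h2, ih (by omega), PySem.List.foldl_append_eq_flatMap, List.nil_append, List.flatMap_map]
    have h3 : (2:Nat) ^ (k+1) = 2 * 2 ^ k := by ring
    rw [h3, pv_range_two_mul, List.map_flatMap]
    apply List.flatMap_congr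
    intro v _
    have e1 : ∀ (b : Nat), b < 2 → (List.range (k+1)).map (fun j => (2*v+b).testBit j)
        = (b == 1) :: (List.range k).map (fun j => v.testBit j) := by
      intro b hb
      rw [List.range_succ_eq_map, List.map_cons, List.map_map]
      congr 1
      · rcases (by omega : b = 0 ∨ b = 1) with rfl | rfl <;>
          simp [Nat.testBit_zero]
      · apply List.map_congr_left
        intro j _
        simp only [Function.comp_apply, Nat.testBit_add_one]
        congr 1
        omega
    have g0 := e1 0 (by omega)
    have g1 := e1 1 (by omega)
    rw [show 2*v+0 = 2*v by ring] at g0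
    simp [g0, g1]


-- ===== VERDICT (by name: the statement is the Claim_ definition above) =====
theorem solution_spec : Claim_equal_solution := by
  intro n info _ hpre
  show solution n info = solution_alt n info
  have hlen : 11 ≤ info.length := hpre
  simp only [solution, solution_alt]
  rw [show (1 <<< 10 : Nat) = 1024 from by decide]
  rw [PySem.List.pyRange_zero_natCast, List.foldl_map]
  have hl := leaves_char 10 (le_refl _)
  norm_num at hl
  rw [hl, List.foldl_map]
  have hfA := PySem.List.foldl_congr_mem (List.range 1024) _
    (fun (st : List Int × Int) m => stepA n st (pvVals n info m)) (List.replicate 11 0, (0:Int))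
    (fun acc x hx => bodyA_eq n info acc x (List.mem_range.mp hx))
  rw [hfA]
  have hfB := PySem.List.foldl_congr_mem (List.range 1024) _
    (fun (b : Option ((Int × List Int) × List Int)) m => stepB n b (pvVals n info m)) none
    (fun acc x _ => bodyB_eq n info acc x)
  rw [hfB]
  rw [← List.foldl_map (f := pvVals n info) (g := stepA n),
      ← List.foldl_map (f := pvVals n info) (g := stepB n)]
  have hV : ∀ v ∈ (List.range 1024).map (pvVals n info), v.2.2.length = 11 := by
    intro v hv
    obtain ⟨m, _, rfl⟩ := List.mem_map.mp hv
    simp [pvVals, pvTmp]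
  have hsim := sim_fold n ((List.range 1024).map (pvVals n info)) hV
    (List.replicate 11 0, (0:Int)) none (Or.inl ⟨rfl, Or.inl rfl⟩)
  set resA := ((List.range 1024).map (pvVals n info)).foldl (stepA n) (List.replicate 11 0, (0:Int)) with hresA
  set resB := ((List.range 1024).map (pvVals n info)).foldl (stepB n) none with hresB
  rcases hsim with ⟨hmd, hb⟩ | ⟨hmd, t, hbest, hans, _⟩
  · rw [if_pos hmd]
    rcases hb with hb | ⟨k, t, hbk, hk1⟩
    · rw [hb]
    · rw [hbk]
      simp [hk1]
  · rw [if_neg (by omega), hbest, hans]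
    have hpos : ¬ resA.2 ≤ 0 := by omega
    simp [hpos]
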